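-- pv_equiv track=rewrite | github.com/or-m-or/KT-AIVLE-School-5th_Codingmasters | example/1st_round/LV0_Basic/page1/8478_Answer.py | solution
-- ===== SOURCE A (Python) =====
-- def solution(A, B, N):
--     day = 1 # 반복횟수 세기
--     count = 0 # 푼 문제수 (종료조건)
--
--     while(True):
--         count = count + A
--         if count >= N:
--             break
--         count = count - B
--         day += 1
--
--     return str(day)
-- ===== SOURCE B (Python) =====
-- def solution(A, B, N):
--     if A >= N:
--         return "1"
--     return str(1 + -((A - N) // (A - B)))
-- ===== Notes on version B (the rewrite author's own statement) =====
-- stated objective: simpler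
-- what changed: Replaces the day-by-day simulation loop with a closed-form ceiling-division formula 1 + ceil((N-A)/(A-B)).
import Mathlib
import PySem

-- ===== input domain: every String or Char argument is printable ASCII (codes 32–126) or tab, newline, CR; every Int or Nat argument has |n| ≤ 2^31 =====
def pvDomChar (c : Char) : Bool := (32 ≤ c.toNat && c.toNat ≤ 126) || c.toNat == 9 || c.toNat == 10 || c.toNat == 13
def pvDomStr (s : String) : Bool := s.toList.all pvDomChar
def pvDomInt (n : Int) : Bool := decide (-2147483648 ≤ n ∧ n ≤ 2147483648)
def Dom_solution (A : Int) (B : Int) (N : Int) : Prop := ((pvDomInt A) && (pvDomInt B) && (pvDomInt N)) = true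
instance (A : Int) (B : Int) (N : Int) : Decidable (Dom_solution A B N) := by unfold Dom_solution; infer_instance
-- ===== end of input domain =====

-- B replaces A's day-by-day simulation loop with a closed-form ceiling-division formula (simpler).

-- ===== PORT A =====
-- The while-True loop, with a fuel guard making it total; under Pre_solution the
-- initial fuel (N - A).toNat + 1 always suffices, so the "0" branch is unreachable there.
def solutionLoop (A : Int) (B : Int) (N : Int) (day : Int) (count : Int) : Nat → String
  | 0 => "0"
  | fuel + 1 =>
    let count := count + A
    if N ≤ count then PySem.Int.toStr day
    else solutionLoop A B N (day + 1) (count - B) fuel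

def solution (A : Int) (B : Int) (N : Int) : String :=
  solutionLoop A B N 1 0 ((N - A).toNat + 1)

-- ===== PORT B =====
def solution_alt (A : Int) (B : Int) (N : Int) : String :=
  if A ≥ N then "1"
  else PySem.Int.toStr (1 + -(PySem.Int.floordiv (A - N) (A - B)))

-- ===== PRECONDITION & SPEC =====
-- Pre_ excludes exactly the inputs where A's while-loop never terminates (A < N with daily gain A - B ≤ 0).
def Pre_solution (A : Int) (B : Int) (N : Int) : Prop := N ≤ A ∨ B < A
instance (A : Int) (B : Int) (N : Int) : Decidable (Pre_solution A B N) := by unfold Pre_solution; infer_instance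
def pvWitness_solution : Int × Int × Int := (5, 2, 20)

def Spec_solution (A : Int) (B : Int) (N : Int) (out : String) : Prop := out = solution_alt A B N
instance (A : Int) (B : Int) (N : Int) (out : String) : Decidable (Spec_solution A B N out) := by unfold Spec_solution; infer_instance

-- ===== CLAIM (what is proved, stated in full; the proofs are below) =====
def Claim_equal_solution : Prop := ∀ (A : Int) (B : Int) (N : Int), Dom_solution A B N → Pre_solution A B N → Spec_solution A B N (solution A B N)

-- ===== LEMMAS AND PROOFS =====

lemma loop_eq (A B N : Int) (hK : B < A) : ∀ (fuel : Nat) (day count : Int),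
    N - (count + A) ≤ (A - B) * fuel →
    solutionLoop A B N day count (fuel + 1) =
      PySem.Int.toStr (day + if N ≤ count + A then 0
                             else -(PySem.Int.floordiv (count + A - N) (A - B))) := by
  intro fuel
  induction fuel with
  | zero =>
    intro day count h
    have hle : N ≤ count + A := by simpa using h
    simp [solutionLoop, hle]
  | succ f ih =>
    intro day count h
    by_cases hle : N ≤ count + A
    · simp [solutionLoop, hle]
    · have hx : 0 < N - count - A := by omega
      have hKpos : (0:Int) < A - B := by omega
      have hstep : N - (count + A - B + A) ≤ (A - B) * f := by
        have : (A - B) * ((f:Int) + 1) = (A - B) * f + (A - B) := by ring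
        push_cast at h
        linarith [h, this]
      have := ih (day + 1) (count + A - B) hstep
      simp only [solutionLoop, hle, if_false] at *
      rw [show count + A - B + A = (count + A - B) + A by ring] at this
      rw [this]
      congr 1
      -- arithmetic: ceil((N-count-A)/(A-B)) = 1 + [next extra]
      by_cases hle2 : N ≤ count + A - B + A
      · have h1 : -(PySem.Int.floordiv (count + A - N) (A - B)) = 1 := by
          rw [show count + A - N = -(N - count - A) by ring]
          rw [PySem.Int.neg_floordiv_neg_eq_iff_of_pos hKpos]
          constructor <;> nlinarith
        rw [show count + A - B + A = (count + A - B) + A by ring] at hle2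
        simp [hle2]
        omega
      · rw [show count + A - B + A = (count + A - B) + A by ring] at hle2
        simp only [hle2, if_false]
        set q : Int := -(PySem.Int.floordiv (count + A - B + A - N) (A - B)) with hq
        have hq' : -(PySem.Int.floordiv (-(N - (count + A - B) - A)) (A - B)) = q := by
          rw [hq]; congr 2; ring
        have hb := (PySem.Int.neg_floordiv_neg_eq_iff_of_pos (a := N - (count + A - B) - A) hKpos).mp hq'
        have hgoal : -(PySem.Int.floordiv (-(N - count - A)) (A - B)) = 1 + q := by
          rw [PySem.Int.neg_floordiv_neg_eq_iff_of_pos hKpos]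
        
          constructor <;> nlinarith [hb.1, hb.2]
        rw [show count + A - N = -(N - count - A) by ring, hgoal]
        ring

-- ===== VERDICT (by name: the statement is the Claim_ definition above) =====
theorem solution_spec : Claim_equal_solution := by
  intro A B N _ hpre
  unfold Spec_solution solution solution_alt
  by_cases hAN : N ≤ A
  · have : (0:Int) + A = A := by ring
    simp [solutionLoop, this, hAN, ge_iff_le]
    decide
  · have hK : B < A := by
      unfold Pre_solution at hpre
      exact hpre.resolve_left hAN
    have hKpos : (0:Int) < A - B := by omega
    have ht : ((N - A).toNat : Int) = N - A := by omega
    have hfuel : N - (0 + A) ≤ (A - B) * ((N - A).toNat : Int) := by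
      have h1 : (1:Int) * ((N - A).toNat : Int) ≤ (A - B) * ((N - A).toNat : Int) := by
        apply mul_le_mul_of_nonneg_right <;> omega
      rw [one_mul] at h1
      linarith [h1, ht]
    rw [loop_eq A B N hK ((N - A).toNat) 1 0 hfuel]
    rw [show (0:Int) + A = A by ring]
    simp [hAN, ge_iff_le]
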